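-- pv_equiv track=rewrite | github.com/craft-code-club/Algorithms-Playground | python/triplicate_numbers/triplicate_numbers_solution.py | is_triplicate_number
-- ===== SOURCE A (Python) =====
-- def is_triplicate_number(s: str) -> bool:
--     stack = []
--
--     for ch in s:
--         if stack and ch == stack[-1][0]:
--             stack[-1][1] += 1
--             if stack[-1][1] == 3: stack.pop()
--             continue
--
--         stack.append([ch, 1])
--
--     return not stack
-- ===== SOURCE B (Python) =====
-- def is_triplicate_number(s: str) -> bool:
--     # Fixpoint rewriting: repeatedly delete the leftmost run of three equal
--     # characters until none remains; the string vanishes iff it is triplicate.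
--     def strip_first_triple(t):
--         for i in range(len(t) - 2):
--             if t[i] == t[i + 1] == t[i + 2]:
--                 return t[:i] + t[i + 3:]
--         return None
--     while True:
--         r = strip_first_triple(s)
--         if r is None:
--             return s == ""
--         s = r
-- ===== Notes on version B (the rewrite author's own statement) =====
-- stated objective: alternative
-- what changed: Replaces A's single-pass run-length stack ([char,count] pairs with count==3 pops) by a fixpoint string-rewriting algorithm: repeatedly find and delete the leftmost run of three equal characters until no triple remains, then test for the empty string; equivalent because the triple-deletion rewrite system is confluent.
import Mathlib
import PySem

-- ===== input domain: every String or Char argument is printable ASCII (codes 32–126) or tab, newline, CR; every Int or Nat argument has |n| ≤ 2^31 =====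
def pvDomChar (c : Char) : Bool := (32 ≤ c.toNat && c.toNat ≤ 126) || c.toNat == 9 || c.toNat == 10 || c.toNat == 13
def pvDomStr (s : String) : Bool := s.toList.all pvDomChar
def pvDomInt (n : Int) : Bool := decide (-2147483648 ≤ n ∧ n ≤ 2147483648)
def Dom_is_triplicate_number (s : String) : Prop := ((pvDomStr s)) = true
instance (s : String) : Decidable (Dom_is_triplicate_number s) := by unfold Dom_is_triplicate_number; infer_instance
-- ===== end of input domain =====

-- B replaces A's one-pass run-length stack by fixpoint rewriting (repeatedly
-- delete the leftmost equal triple until none remains); objective: alternative.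

-- ===== PORT A =====
-- stack held top-at-head; each Python step (merge into top pair / pop at count 3 / push new pair) is transcribed
def pvLoopA : List Char → List (Char × Int) → List (Char × Int)
  | [], stack => stack
  | ch :: rest, stack =>
    match stack with
    | (c, k) :: tl =>
      if ch == c then
        pvLoopA rest (if k + 1 == 3 then tl else (c, k + 1) :: tl)
      else
        pvLoopA rest ((ch, 1) :: (c, k) :: tl)
    | [] => pvLoopA rest [(ch, 1)]

def is_triplicate_number (s : String) : Bool :=
  (pvLoopA s.toList []).isEmpty

-- ===== PORT B =====
-- strip_first_triple: left-to-right scan; at the first i with t[i]=t[i+1]=t[i+2]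
-- return t with those three removed (t[:i] + t[i+3:]), else None
def pvStrip : List Char → Option (List Char)
  | a :: b :: c :: rest =>
    if a == b && b == c then some rest
    else (pvStrip (b :: c :: rest)).map (a :: ·)
  | _ => none

-- termination of the while-loop: each deletion shortens the list
lemma pvStrip_length : ∀ (l r : List Char), pvStrip l = some r → r.length < l.length := by
  intro l
  induction l with
  | nil => intro r h; simp [pvStrip] at h
  | cons a t ih =>
    intro r h
    match t, h with
    | [], h => simp [pvStrip] at h
    | [x], h => simp [pvStrip] at h
    | b :: c :: rest, h =>
      simp only [pvStrip] at h
      split at h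
      · cases h; simp; omega
      · cases hr : pvStrip (b :: c :: rest) with
        | none => rw [hr] at h; simp at h
        | some r' =>
          rw [hr] at h
          simp at h
          have := ih r' hr
          rw [← h]; simp at this ⊢; omega

-- the while-loop: rewrite until no triple remains
def pvReduce (l : List Char) : List Char :=
  match h : pvStrip l with
  | some r => pvReduce r
  | none => l
termination_by l.length
decreasing_by exact pvStrip_length _ _ h

def is_triplicate_number_alt (s : String) : Bool :=
  (pvReduce s.toList).isEmpty

-- ===== PRECONDITION & SPEC =====
def Spec_is_triplicate_number (s : String) (out : Bool) : Prop := out = is_triplicate_number_alt s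
instance (s : String) (out : Bool) : Decidable (Spec_is_triplicate_number s out) := by unfold Spec_is_triplicate_number; infer_instance

-- ===== CLAIM (what is proved, stated in full; the proofs are below) =====
def Claim_equal_is_triplicate_number : Prop := ∀ (s : String), Dom_is_triplicate_number s → Spec_is_triplicate_number s (is_triplicate_number s)

-- ===== LEMMAS AND PROOFS =====

-- proof-side mediator: a plain character stack with top-of-three pops
def pvStep (ch : Char) (st : List Char) : List Char :=
  match ch :: st with
  | a :: b :: c :: tl => if a == b && b == c then tl else a :: b :: c :: tl
  | st' => st'

def pvCStack : List Char → List Char → List Char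
  | [], st => st
  | ch :: rest, st => pvCStack rest (pvStep ch st)

-- A's pair stack expanded into the character stack it denotes (valid under pvGood)
def pvExpand : List (Char × Int) → List Char
  | [] => []
  | (c, k) :: tl => (if k == 1 then [c] else [c, c]) ++ pvExpand tl

-- invariant of A's stack: counts are 1 or 2 and adjacent runs carry distinct chars
def pvGood : List (Char × Int) → Prop
  | [] => True
  | (c, k) :: tl => (k = 1 ∨ k = 2) ∧ (∀ c' k' tl', tl = (c', k') :: tl' → c ≠ c') ∧ pvGood tl

lemma pvStep_ne (ch b : Char) (z : List Char) (h : ch ≠ b) :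
    pvStep ch (b :: z) = ch :: b :: z := by
  cases z <;> simp [pvStep, h]

lemma pvStep_two (ch : Char) (z : List Char)
    (h : ∀ x xs, z = x :: xs → ch ≠ x) :
    pvStep ch (ch :: z) = ch :: ch :: z := by
  cases hz : z with
  | nil => simp [pvStep]
  | cons x xs => simp [pvStep, h x xs hz]

lemma pvStep_pop (ch : Char) (z : List Char) :
    pvStep ch (ch :: ch :: z) = z := by
  simp [pvStep]

lemma pv_key : ∀ (cs : List Char) (st : List (Char × Int)), pvGood st →
    pvCStack cs (pvExpand st) = pvExpand (pvLoopA cs st) := by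
  intro cs
  induction cs with
  | nil => intro st _; simp [pvLoopA, pvCStack]
  | cons ch rest ih =>
    intro st hg
    match st with
    | [] =>
      have h2 : pvExpand [(ch, (1:Int))] = [ch] := by simp [pvExpand]
      show pvCStack rest (pvStep ch []) = pvExpand (pvLoopA rest [(ch, 1)])
      simp only [pvStep]
      rw [← h2, ih _ (by simp [pvGood])]
    | (c, k) :: tl =>
      obtain ⟨hk, hdist, hgtl⟩ := hg
      by_cases hcc : ch = c
      · subst hcc
        rcases hk with hk | hk
        · subst hk
          have hA : pvLoopA (ch :: rest) ((ch, (1:Int)) :: tl) = pvLoopA rest ((ch, 2) :: tl) := by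
            simp [pvLoopA]
          have he1 : pvExpand ((ch, (1:Int)) :: tl) = ch :: pvExpand tl := by simp [pvExpand]
          have he2 : pvExpand ((ch, (2:Int)) :: tl) = ch :: ch :: pvExpand tl := by simp [pvExpand]
          have hhd : ∀ x xs, pvExpand tl = x :: xs → ch ≠ x := by
            intro x xs hx
            match htl : tl with
            | [] => simp [pvExpand] at hx
            | (c', k') :: tl' =>
              have : pvExpand ((c', k') :: tl') = (if k' == 1 then [c'] else [c', c']) ++ pvExpand tl' := by
                simp [pvExpand]
              rw [this] at hx
              have hxc : x = c' := by split at hx <;> simp_all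
              rw [hxc]; exact hdist c' k' tl' rfl
          have hgood2 : pvGood ((ch, (2:Int)) :: tl) := ⟨Or.inr rfl, hdist, hgtl⟩
          show pvCStack rest (pvStep ch (pvExpand ((ch, (1:Int)) :: tl))) = _
          rw [hA, he1, pvStep_two ch _ hhd, ← he2, ih _ hgood2]
        · subst hk
          have hA : pvLoopA (ch :: rest) ((ch, (2:Int)) :: tl) = pvLoopA rest tl := by
            simp [pvLoopA]
          have he2 : pvExpand ((ch, (2:Int)) :: tl) = ch :: ch :: pvExpand tl := by simp [pvExpand]
          show pvCStack rest (pvStep ch (pvExpand ((ch, (2:Int)) :: tl))) = _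
          rw [hA, he2, pvStep_pop, ih _ hgtl]
      · have hA : pvLoopA (ch :: rest) ((c, k) :: tl) = pvLoopA rest ((ch, 1) :: (c, k) :: tl) := by
          simp [pvLoopA, hcc]
        have he0 : pvExpand ((c, k) :: tl) = c :: ((if k == 1 then [] else [c]) ++ pvExpand tl) := by
          simp only [pvExpand]; split <;> simp_all
        have he1 : pvExpand ((ch, (1:Int)) :: (c, k) :: tl) = ch :: pvExpand ((c, k) :: tl) := by
          simp [pvExpand]
        have hgood1 : pvGood ((ch, (1:Int)) :: (c, k) :: tl) :=
          ⟨Or.inl rfl, by intro a b t h; cases h; exact hcc, hk, hdist, hgtl⟩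
        show pvCStack rest (pvStep ch (pvExpand ((c, k) :: tl))) = _
        rw [hA, he0, pvStep_ne ch c _ hcc, ← he0, ← he1, ih _ hgood1]

lemma pvExpand_ne_nil (c : Char) (k : Int) (tl : List (Char × Int)) :
    pvExpand ((c, k) :: tl) ≠ [] := by
  simp only [pvExpand]
  split <;> simp

lemma pvExpand_isEmpty (st : List (Char × Int)) :
    (pvExpand st).isEmpty = st.isEmpty := by
  match st with
  | [] => rfl
  | (c, k) :: tl =>
    have := pvExpand_ne_nil c k tl
    simp [this]

-- "no three equal adjacent characters"
def pvNoTrip : List Char → Bool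
  | a :: b :: c :: r => !(a == b && b == c) && pvNoTrip (b :: c :: r)
  | _ => true

lemma pvNoTrip_tail (a : Char) (l : List Char) (h : pvNoTrip (a :: l) = true) :
    pvNoTrip l = true := by
  match l with
  | [] => rfl
  | [x] => rfl
  | b :: c :: r => simp only [pvNoTrip, Bool.and_eq_true] at h; exact h.2

lemma pvNoTrip_suffix : ∀ (u l : List Char), pvNoTrip (u ++ l) = true → pvNoTrip l = true := by
  intro u
  induction u with
  | nil => intro l h; exact h
  | cons a t ih => intro l h; exact ih l (pvNoTrip_tail a (t ++ l) h)

lemma pvStep_preserves (ch : Char) (st : List Char) (h : pvNoTrip st = true) :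
    pvNoTrip (pvStep ch st) = true := by
  match st with
  | [] => rfl
  | [x] => simp [pvStep]; rfl
  | b :: c :: tl =>
    simp only [pvStep]
    split
    · exact pvNoTrip_tail c tl (pvNoTrip_tail b (c :: tl) h)
    · rename_i hne
      simp only [pvNoTrip, Bool.and_eq_true, Bool.not_eq_true']
      exact ⟨by simpa using hne, h⟩

-- inserting/deleting a triple is invisible to the character stack
lemma pvCStack_triple (c : Char) (v st : List Char) (h : pvNoTrip st = true) :
    pvCStack (c :: c :: c :: v) st = pvCStack v st := by
  match st with
  | [] => simp [pvCStack, pvStep]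
  | [x] =>
    by_cases hx : c = x
    · subst hx; simp [pvCStack, pvStep]
    · simp [pvCStack, pvStep, hx]
  | x :: y :: z =>
    by_cases hx : c = x
    · subst hx
      by_cases hy : c = y
      · subst hy
        -- st = c :: c :: z, head of z ≠ c by pvNoTrip
        have hz : ∀ w t, z = w :: t → c ≠ w := by
          intro w t hw
          subst hw
          simp only [pvNoTrip, Bool.and_eq_true, Bool.not_eq_true', Bool.and_eq_false_iff] at h
          intro hcw; subst hcw
          rcases h.1 with h1 | h1 <;> simp at h1
        show pvCStack (c :: c :: v) (pvStep c (c :: c :: z)) = _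
        rw [pvStep_pop]
        show pvCStack (c :: v) (pvStep c z) = pvCStack v (c :: c :: z)
        cases z with
        | nil => simp [pvCStack, pvStep]
        | cons w t =>
          have hcw := hz w t rfl
          rw [pvStep_ne c w t hcw]
          show pvCStack v (pvStep c (c :: w :: t)) = _
          simp [pvStep, hcw]
      · -- st = c :: y :: z with c ≠ y
        show pvCStack (c :: c :: v) (pvStep c (c :: y :: z)) = _
        have h1 : pvStep c (c :: y :: z) = c :: c :: y :: z := by simp [pvStep, hy]
        rw [h1]
        show pvCStack (c :: v) (pvStep c (c :: c :: y :: z)) = _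
        rw [pvStep_pop]
        show pvCStack v (pvStep c (y :: z)) = _
        rw [pvStep_ne c y z hy]
    · -- c ≠ x
      show pvCStack (c :: c :: v) (pvStep c (x :: y :: z)) = _
      rw [pvStep_ne c x _ hx]
      show pvCStack (c :: v) (pvStep c (c :: x :: y :: z)) = _
      have h1 : pvStep c (c :: x :: y :: z) = c :: c :: x :: y :: z := by simp [pvStep, hx]
      rw [h1]
      show pvCStack v (pvStep c (c :: c :: x :: y :: z)) = _
      rw [pvStep_pop]

lemma pvCStack_del : ∀ (u : List Char) (c : Char) (v st : List Char), pvNoTrip st = true →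
    pvCStack (u ++ c :: c :: c :: v) st = pvCStack (u ++ v) st := by
  intro u
  induction u with
  | nil => intro c v st h; exact pvCStack_triple c v st h
  | cons a t ih =>
    intro c v st h
    show pvCStack (t ++ c :: c :: c :: v) (pvStep a st) = pvCStack (t ++ v) (pvStep a st)
    exact ih c v _ (pvStep_preserves a st h)

-- on a triple-free input the stack never pops
lemma pvCStack_noPop : ∀ (l st : List Char), pvNoTrip (st.reverse ++ l) = true →
    pvCStack l st = l.reverse ++ st := by
  intro l
  induction l with
  | nil => intro st _; simp [pvCStack]
  | cons a t ih =>
    intro st h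
    have hstep : pvStep a st = a :: st := by
      match st with
      | [] => rfl
      | [x] => simp [pvStep]
      | s0 :: s1 :: tl =>
        have hsf : pvNoTrip (s1 :: s0 :: a :: t) = true := by
          apply pvNoTrip_suffix (tl.reverse)
          have : tl.reverse ++ s1 :: s0 :: a :: t = (s0 :: s1 :: tl).reverse ++ a :: t := by
            simp only [List.reverse_cons, List.append_assoc, List.cons_append, List.nil_append]
          rw [this]; exact h
        simp only [pvNoTrip, Bool.and_eq_true, Bool.not_eq_true', Bool.and_eq_false_iff] at hsf
        simp only [pvStep]
        have : ¬ (a == s0 && s0 == s1) = true := by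
          intro hc
          simp only [Bool.and_eq_true, beq_iff_eq] at hc
          rcases hsf.1 with h1 | h1
          · exact absurd hc.2.symm (by simpa using h1)
          · exact absurd hc.1.symm (by simpa using h1)
        simp [this]
    show pvCStack t (pvStep a st) = (a :: t).reverse ++ st
    rw [hstep]
    have h' : pvNoTrip ((a :: st).reverse ++ t) = true := by
      have : (a :: st).reverse ++ t = st.reverse ++ a :: t := by simp
      rw [this]; exact h
    rw [ih (a :: st) h']
    simp

lemma pvStrip_none_noTrip : ∀ (l : List Char), pvStrip l = none → pvNoTrip l = true := by
  intro l
  induction l with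
  | nil => intro _; rfl
  | cons a t ih =>
    intro h
    match t with
    | [] => rfl
    | [x] => rfl
    | b :: c :: r =>
      simp only [pvStrip] at h
      split at h
      · simp at h
      · rename_i hne
        cases hr : pvStrip (b :: c :: r) with
        | none =>
          simp only [pvNoTrip, Bool.and_eq_true, Bool.not_eq_true']
          exact ⟨by simpa using hne, ih hr⟩
        | some r' => rw [hr] at h; simp at h

lemma pvStrip_decomp : ∀ (l r : List Char), pvStrip l = some r →
    ∃ u c v, l = u ++ c :: c :: c :: v ∧ r = u ++ v := by
  intro l
  induction l with
  | nil => intro r h; simp [pvStrip] at h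
  | cons a t ih =>
    intro r h
    match t with
    | [] => simp [pvStrip] at h
    | [x] => simp [pvStrip] at h
    | b :: c :: rest =>
      simp only [pvStrip] at h
      split at h
      · rename_i heq
        simp only [Bool.and_eq_true, beq_iff_eq] at heq
        obtain ⟨h1, h2⟩ := heq
        cases h
        exact ⟨[], a, r, by simp [h1, h2], by simp⟩
      · cases hr : pvStrip (b :: c :: rest) with
        | none => rw [hr] at h; simp at h
        | some r' =>
          rw [hr] at h; simp at h
          obtain ⟨u, c', v, hl, hr'⟩ := ih r' hr
          exact ⟨a :: u, c', v, by simp [hl], by simp [← h, hr']⟩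

lemma pvReduce_noTrip : ∀ (l : List Char), pvNoTrip (pvReduce l) = true := by
  intro l
  induction hlen : l.length using Nat.strong_induction_on generalizing l with
  | _ n ih =>
    rw [pvReduce]
    cases h : pvStrip l with
    | none => exact pvStrip_none_noTrip l h
    | some r =>
      have := pvStrip_length l r h
      exact ih r.length (by omega) r rfl

lemma pvCStack_reduce : ∀ (l : List Char), pvCStack l [] = pvCStack (pvReduce l) [] := by
  intro l
  induction hlen : l.length using Nat.strong_induction_on generalizing l with
  | _ n ih =>
    rw [pvReduce]
    cases h : pvStrip l with
    | none => rfl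
    | some r =>
      obtain ⟨u, c, v, hl, hr⟩ := pvStrip_decomp l r h
      have hlen' := pvStrip_length l r h
      calc pvCStack l [] = pvCStack (u ++ v) [] := by rw [hl]; exact pvCStack_del u c v [] rfl
        _ = pvCStack (pvReduce r) [] := by rw [← hr]; exact ih r.length (by omega) r rfl

-- ===== VERDICT (by name: the statement is the Claim_ definition above) =====
theorem is_triplicate_number_spec : Claim_equal_is_triplicate_number := by
  intro s _
  show (pvLoopA s.toList []).isEmpty = (pvReduce s.toList).isEmpty
  have hA : pvCStack s.toList [] = pvExpand (pvLoopA s.toList []) := by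
    have := pv_key s.toList [] trivial
    simpa [pvExpand] using this
  have hB : pvCStack (pvReduce s.toList) [] = (pvReduce s.toList).reverse := by
    have := pvCStack_noPop (pvReduce s.toList) []
    simp only [List.reverse_nil, List.nil_append, List.append_nil] at this
    exact this (pvReduce_noTrip s.toList)
  have h := pvCStack_reduce s.toList
  rw [hA, hB] at h
  rw [← pvExpand_isEmpty, h]
  simp
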